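-- pv_equiv track=rewrite | github.com/anti-fragile-study/algorithm-study | week-11/신고_결과_받기.py | solution
-- ===== SOURCE A (Python) =====
-- from collections import defaultdict
--
-- def solution(id_list, report, k):
--     reported = defaultdict(set)
--
--     for log in report:
--         plaintiff, defendant = log.split()
--         reported[defendant].add(plaintiff)
--
--     mailed = defaultdict(int)
--
--     for user, plaintiffs in reported.items():
--         if len(plaintiffs) >= k:
--             for plaintiff in plaintiffs:
--                 mailed[plaintiff] += 1
--
--     return list(map(lambda x: mailed[x], id_list))
-- ===== SOURCE B (Python) =====
-- def solution(id_list, report, k):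
--     # Flat set of deduplicated (plaintiff, defendant) pairs.
--     pairs = set()
--     for log in report:
--         plaintiff, defendant = log.split()
--         pairs.add((plaintiff, defendant))
--     # Distinct-reporter count per defendant.
--     cnt = {}
--     for _, defendant in pairs:
--         cnt[defendant] = cnt.get(defendant, 0) + 1
--     # Second flat pass: mails received by each user x.
--     return [sum(1 for p, d in pairs if p == x and cnt[d] >= k) for x in id_list]
-- ===== Notes on version B (the rewrite author's own statement) =====
-- stated objective: alternative
-- what changed: Replaces A's dict-of-sets plus nested per-defendant loop with a flat deduplicated set of (plaintiff, defendant) pairs, a count table built in one flat pass, and a second flat pass counting mails per user.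
import Mathlib
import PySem

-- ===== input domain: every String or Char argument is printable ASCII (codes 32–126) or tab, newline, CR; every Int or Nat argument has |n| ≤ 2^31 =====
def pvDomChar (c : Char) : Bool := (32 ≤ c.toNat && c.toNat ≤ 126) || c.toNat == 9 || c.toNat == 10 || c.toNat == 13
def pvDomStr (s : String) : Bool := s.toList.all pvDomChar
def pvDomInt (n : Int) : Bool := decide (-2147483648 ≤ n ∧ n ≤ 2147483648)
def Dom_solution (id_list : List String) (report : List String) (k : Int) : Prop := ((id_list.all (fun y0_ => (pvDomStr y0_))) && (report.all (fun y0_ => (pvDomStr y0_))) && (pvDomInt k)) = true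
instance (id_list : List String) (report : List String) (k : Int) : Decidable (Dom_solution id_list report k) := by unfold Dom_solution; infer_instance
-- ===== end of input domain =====

-- B replaces A's dict-of-sets + nested per-defendant loop by a flat deduplicated
-- pair set, a per-defendant count table, and a flat counting pass per user
-- (same results; no speed claim).

-- ===== PORT A =====
def solution (id_list : List String) (report : List String) (k : Int) : List Int :=
  let reported : PySem.Dict String (PySem.Set String) :=
    report.foldl (fun rep log =>
      match PySem.Str.split₀ log with
      | [plaintiff, defendant] =>
          rep.insert defendant (PySem.Set.add (rep.getD defendant PySem.Set.empty) plaintiff)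
      | _ => rep) PySem.Dict.empty
  let mailed : PySem.Dict String Int :=
    reported.items.foldl (fun m ud =>
      if k ≤ (ud.2.length : Int) then
        ud.2.foldl (fun m2 p => m2.modify p 0 (· + 1)) m
      else m) PySem.Dict.empty
  id_list.map (fun x => mailed.getD x 0)

-- ===== PORT B =====
def solution_alt (id_list : List String) (report : List String) (k : Int) : List Int :=
  let pairs : PySem.Set (String × String) :=
    report.foldl (fun s log =>
      let ws := PySem.Str.split₀ log
      if ws.length = 2 then PySem.Set.add s (ws.getD 0 "", ws.getD 1 "") else s)
      PySem.Set.empty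
  let cnt : PySem.Dict String Int :=
    pairs.foldl (fun c pd => c.modify pd.2 0 (· + 1)) PySem.Dict.empty
  id_list.map (fun x =>
    pairs.foldl (fun acc pd =>
      if pd.1 == x && decide (k ≤ cnt.getD pd.2 0) then acc + 1 else acc) (0 : Int))

-- ===== PRECONDITION & SPEC =====
-- Pre_ excludes only reports whose log does not split into exactly two words:
-- there the Python raises ValueError on unpacking.
def Pre_solution (id_list : List String) (report : List String) (k : Int) : Prop :=
  ∀ log ∈ report, (PySem.Str.split₀ log).length = 2
instance (id_list : List String) (report : List String) (k : Int) : Decidable (Pre_solution id_list report k) := by unfold Pre_solution; infer_instance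

def pvWitness_solution : List String × List String × Int := (["a", "b"], ["a b", "b a", "a b"], 1)

def Spec_solution (id_list : List String) (report : List String) (k : Int) (out : List Int) : Prop := out = solution_alt id_list report k
instance (id_list : List String) (report : List String) (k : Int) (out : List Int) : Decidable (Spec_solution id_list report k out) := by unfold Spec_solution; infer_instance

-- ===== CLAIM (what is proved, stated in full; the proofs are below) =====
def Claim_equal_solution : Prop := ∀ (id_list : List String) (report : List String) (k : Int), Dom_solution id_list report k → Pre_solution id_list report k → Spec_solution id_list report k (solution id_list report k)

-- ===== LEMMAS AND PROOFS =====

-- the (plaintiff, defendant) pairs of the logs that split into exactly two words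
def pvLogPairs : List String → List (String × String)
  | [] => []
  | log :: t =>
    match PySem.Str.split₀ log with
    | [p, d] => (p, d) :: pvLogPairs t
    | _ => pvLogPairs t

-- the body of A's first loop, over an already-split pair
def pvStepA (rep : PySem.Dict String (PySem.Set String)) (pd : String × String) :
    PySem.Dict String (PySem.Set String) :=
  rep.insert pd.2 (PySem.Set.add (rep.getD pd.2 PySem.Set.empty) pd.1)

-- A's first loop over report is the pvStepA fold over the split pairs
lemma pv_foldA (report : List String) :
    ∀ (init : PySem.Dict String (PySem.Set String)),
    report.foldl (fun rep log =>
      match PySem.Str.split₀ log with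
      | [plaintiff, defendant] =>
          rep.insert defendant (PySem.Set.add (rep.getD defendant PySem.Set.empty) plaintiff)
      | _ => rep) init = (pvLogPairs report).foldl pvStepA init := by
  induction report with
  | nil => intro init; rfl
  | cons a t ih =>
    intro init
    simp only [List.foldl_cons]
    rcases hsp : PySem.Str.split₀ a with _ | ⟨p, _ | ⟨d, _ | _⟩⟩
    · simpa [pvLogPairs, hsp] using ih init
    · simpa [pvLogPairs, hsp] using ih init
    · simpa [pvLogPairs, hsp, pvStepA] using
        ih (init.insert d (PySem.Set.add (init.getD d PySem.Set.empty) p))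
    · simpa [pvLogPairs, hsp] using ih init

-- B's first loop over report is the Set.add fold over the split pairs
lemma pv_foldB (report : List String) :
    ∀ (init : PySem.Set (String × String)),
    report.foldl (fun s log =>
      let ws := PySem.Str.split₀ log
      if ws.length = 2 then PySem.Set.add s (ws.getD 0 "", ws.getD 1 "") else s)
      init = (pvLogPairs report).foldl PySem.Set.add init := by
  induction report with
  | nil => intro init; rfl
  | cons a t ih =>
    intro init
    simp only [List.foldl_cons]
    rcases hsp : PySem.Str.split₀ a with _ | ⟨p, _ | ⟨d, _ | _⟩⟩
    · simpa [pvLogPairs, hsp] using ih init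
    · simpa [pvLogPairs, hsp] using ih init
    · simpa [pvLogPairs, hsp] using ih (PySem.Set.add init (p, d))
    · simpa [pvLogPairs, hsp] using ih init

lemma pv_set_add_mem {α : Type} [BEq α] [LawfulBEq α] (s : PySem.Set α) (x : α) (h : x ∈ s) :
    PySem.Set.add s x = s := by
  simp [PySem.Set.add, PySem.Set.contains, h]

lemma pv_set_add_not_mem {α : Type} [BEq α] [LawfulBEq α] (s : PySem.Set α) (x : α) (h : x ∉ s) :
    PySem.Set.add s x = s ++ [x] := by
  simp [PySem.Set.add, PySem.Set.contains, h]

-- invariant relating A's dict-of-sets to B's flat pair list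
def pvRel (rep : PySem.Dict String (PySem.Set String)) (s : List (String × String)) : Prop :=
  rep.keys.Nodup ∧
  (∀ d, rep.getD d PySem.Set.empty = (s.filter (fun pd => pd.2 == d)).map Prod.fst) ∧
  (∀ pd ∈ s, pd.2 ∈ rep.keys)

lemma pv_mem_pair_iff (rep : PySem.Dict String (PySem.Set String)) (s : List (String × String))
    (h2 : ∀ d, rep.getD d PySem.Set.empty = (s.filter (fun pd => pd.2 == d)).map Prod.fst)
    (p d : String) : p ∈ rep.getD d PySem.Set.empty ↔ (p, d) ∈ s := by
  rw [h2 d]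
  constructor
  · intro hp
    rcases List.mem_map.mp hp with ⟨pd, hpd, hfst⟩
    rcases List.mem_filter.mp hpd with ⟨hmem, hsnd⟩
    have : pd = (p, d) := by
      cases pd; simp_all
    rwa [this] at hmem
  · intro hmem
    exact List.mem_map.mpr ⟨(p, d), List.mem_filter.mpr ⟨hmem, by simp⟩, rfl⟩

lemma pv_rel_step (rep : PySem.Dict String (PySem.Set String)) (s : List (String × String))
    (h : pvRel rep s) (pd : String × String) :
    pvRel (pvStepA rep pd) (PySem.Set.add s pd) := by
  obtain ⟨h1, h2, h3⟩ := h
  obtain ⟨p, d⟩ := pd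
  have hmem := pv_mem_pair_iff rep s h2 p d
  refine ⟨PySem.Dict.nodup_keys_insert _ _ _ h1, ?_, ?_⟩
  · intro d'
    by_cases hd : d' = d
    · subst hd
      simp only [pvStepA]
      rw [PySem.Dict.getD_insert_self]
      by_cases hp : (p, d') ∈ s
      · have hps : p ∈ rep.getD d' PySem.Set.empty := hmem.mpr hp
        rw [pv_set_add_mem _ _ hps, pv_set_add_mem _ _ hp, h2 d']
      · have hps : p ∉ rep.getD d' PySem.Set.empty := fun hx => hp (hmem.mp hx)
        rw [pv_set_add_not_mem _ _ hps, pv_set_add_not_mem _ _ hp, h2 d',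
          List.filter_append]
        simp
    · simp only [pvStepA]
      rw [PySem.Dict.getD_insert_of_ne _ _ _ hd, h2 d']
      by_cases hp : (p, d) ∈ s
      · rw [pv_set_add_mem _ _ hp]
      · rw [pv_set_add_not_mem _ _ hp, List.filter_append]
        have hnil : (((p, d) :: List.nil).filter (fun pd : String × String => pd.2 == d')) = [] := by
          simp [show ¬ (d = d') from fun hh => hd hh.symm]
        simp [hnil]
  · intro pd' hpd'
    simp only [pvStepA]
    by_cases hp : (p, d) ∈ s
    · rw [pv_set_add_mem _ _ hp] at hpd'
      exact (PySem.Dict.mem_keys_insert _ _ _ _).mpr (Or.inr (h3 pd' hpd'))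
    · rw [pv_set_add_not_mem _ _ hp] at hpd'
      rcases List.mem_append.mp hpd' with hin | hnew
      · exact (PySem.Dict.mem_keys_insert _ _ _ _).mpr (Or.inr (h3 pd' hin))
      · have : pd' = (p, d) := by simpa using hnew
        subst this
        exact (PySem.Dict.mem_keys_insert _ _ _ _).mpr (Or.inl rfl)

lemma pv_rel_fold (L : List (String × String)) :
    ∀ (rep : PySem.Dict String (PySem.Set String)) (s : List (String × String)),
    pvRel rep s → pvRel (L.foldl pvStepA rep) (L.foldl PySem.Set.add s) := by
  induction L with
  | nil => intro rep s h; exact h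
  | cons pd t ih =>
    intro rep s h
    simp only [List.foldl_cons]
    exact ih _ _ (pv_rel_step rep s h pd)

lemma pv_rel_init : pvRel PySem.Dict.empty [] := by
  refine ⟨PySem.Dict.nodup_keys_empty, ?_, ?_⟩
  · intro d; simp [PySem.Dict.getD_empty]
  · intro pd h; simp at h

-- A's mailed dict: getD after the counting loop is the sum of the per-item contributions
lemma pv_mailed_getD (k : Int) (x : String) :
    ∀ (its : List (String × PySem.Set String)) (m : PySem.Dict String Int),
    (its.foldl (fun m ud =>
      if k ≤ (ud.2.length : Int) then
        ud.2.foldl (fun m2 p => m2.modify p 0 (· + 1)) m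
      else m) m).getD x 0
    = m.getD x 0 +
      (its.map (fun ud => if k ≤ (ud.2.length : Int) then (ud.2.count x : Int) else 0)).sum := by
  intro its
  induction its with
  | nil => intro m; simp
  | cons ud t ih =>
    intro m
    simp only [List.foldl_cons, List.map_cons, List.sum_cons]
    by_cases hk : k ≤ (ud.2.length : Int)
    · rw [if_pos hk, ih, PySem.Dict.getD_foldl_modify_add_one, if_pos hk]
      ring
    · rw [if_neg hk, ih, if_neg hk]
      ring

-- B's count table: lookup is the number of pairs with that defendant
lemma pv_cnt_getD (s : List (String × String)) (d : String) :
    (s.foldl (fun c pd => c.modify pd.2 0 (· + 1))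
        (PySem.Dict.empty : PySem.Dict String Int)).getD d 0
    = (s.countP (fun pd => pd.2 == d) : Int) := by
  have h : s.foldl (fun c pd => c.modify pd.2 0 (· + 1))
        (PySem.Dict.empty : PySem.Dict String Int)
      = (s.map Prod.snd).foldl (fun c y => c.modify y 0 (· + 1))
        (PySem.Dict.empty : PySem.Dict String Int) := by
    rw [List.foldl_map]
  rw [h, PySem.Dict.getD_foldl_modify_add_one, PySem.Dict.getD_empty, zero_add,
    List.count_eq_countP, List.countP_map]
  rfl

-- splitting an Int sum over a list by a boolean predicate
lemma pv_sum_split (p : String × String → Bool) (g : String × String → Int) :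
    ∀ (s : List (String × String)),
    (s.map g).sum = ((s.filter p).map g).sum + ((s.filter (fun pd => !p pd)).map g).sum := by
  intro s
  induction s with
  | nil => simp
  | cons a t ih =>
    by_cases hp : p a <;> simp [hp, ih] <;> ring

-- partitioning the pair sum by a nodup covering key list
lemma pv_sum_partition (g : String × String → Int) :
    ∀ (keys : List String) (s : List (String × String)), keys.Nodup →
    (∀ pd ∈ s, pd.2 ∈ keys) →
    (s.map g).sum = (keys.map (fun d => ((s.filter (fun pd => pd.2 == d)).map g).sum)).sum := by
  intro keys
  induction keys with
  | nil =>
    intro s _ hcov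
    cases s with
    | nil => simp
    | cons a t => exact absurd (hcov a (by simp)) (by simp)
  | cons d rest ih =>
    intro s hnd hcov
    have hnd' : rest.Nodup := hnd.of_cons
    have hdmem : d ∉ rest := (List.nodup_cons.mp hnd).1
    have hcov' : ∀ pd ∈ s.filter (fun pd => !(pd.2 == d)), pd.2 ∈ rest := by
      intro pd hpd
      rcases List.mem_filter.mp hpd with ⟨hmem, hne⟩
      rcases List.mem_cons.mp (hcov pd hmem) with hcase | hcase
      · simp [hcase] at hne
      · exact hcase
    rw [pv_sum_split (fun pd => pd.2 == d) g s,
      ih (s.filter (fun pd => !(pd.2 == d))) hnd' hcov']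
    simp only [List.map_cons, List.sum_cons]
    congr 1
    refine congrArg List.sum (List.map_congr_left ?_)
    intro d' hd'
    have hne : d' ≠ d := fun hh => hdmem (hh ▸ hd')
    have hfil : (s.filter (fun pd => !(pd.2 == d))).filter (fun pd => pd.2 == d')
        = s.filter (fun pd => pd.2 == d') := by
      rw [List.filter_filter]
      apply List.filter_congr
      intro pd _
      by_cases hcase : pd.2 = d'
      · simp [hcase]
        exact hne
      · simp [hcase]
    rw [hfil]

-- the contribution of one defendant's pairs equals A's per-item contribution
lemma pv_per_key (k : Int) (x : String) (s : List (String × String))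
    (cnt : PySem.Dict String Int)
    (hcnt : ∀ d, cnt.getD d 0 = (s.countP (fun pd => pd.2 == d) : Int))
    (S : PySem.Set String) (d : String)
    (hS : S = (s.filter (fun pd => pd.2 == d)).map Prod.fst) :
    ((s.filter (fun pd => pd.2 == d)).map
        (fun pd => if pd.1 == x && decide (k ≤ cnt.getD pd.2 0) then (1 : Int) else 0)).sum
    = if k ≤ (S.length : Int) then (S.count x : Int) else 0 := by
  have hlen : (S.length : Int) = cnt.getD d 0 := by
    rw [hS, hcnt d, List.length_map, List.countP_eq_length_filter]
  by_cases hk : k ≤ (S.length : Int)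
  · have hcong : ((s.filter (fun pd => pd.2 == d)).map
          (fun pd => if pd.1 == x && decide (k ≤ cnt.getD pd.2 0) then (1 : Int) else 0))
        = ((s.filter (fun pd => pd.2 == d)).map
          (fun pd : String × String => if pd.1 == x then (1 : Int) else 0)) := by
      apply List.map_congr_left
      intro pd hpd
      have hd : pd.2 = d := by
        have := (List.mem_filter.mp hpd).2
        simpa using this
      have : decide (k ≤ cnt.getD pd.2 0) = true := by
        rw [hd, ← hlen]; simpa using hk
      simp [this]
    rw [hcong, if_pos hk,
      PySem.List.sum_map_ite_one_zero (fun pd : String × String => pd.1 == x)]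
    congr 1
    rw [hS, List.count_eq_countP, List.countP_map]
    rfl
  · have hcong : ((s.filter (fun pd => pd.2 == d)).map
          (fun pd => if pd.1 == x && decide (k ≤ cnt.getD pd.2 0) then (1 : Int) else 0))
        = ((s.filter (fun pd => pd.2 == d)).map (fun _ => (0 : Int))) := by
      apply List.map_congr_left
      intro pd hpd
      have hd : pd.2 = d := by
        have := (List.mem_filter.mp hpd).2
        simpa using this
      have : decide (k ≤ cnt.getD pd.2 0) = false := by
        rw [hd, ← hlen]; simpa using hk
      simp [this]
    rw [hcong, if_neg hk]
    simp

-- the core equality, for any state satisfying the invariant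
lemma pv_value_eq (k : Int) (x : String) (rep : PySem.Dict String (PySem.Set String))
    (s : List (String × String)) (h : pvRel rep s) :
    (rep.items.foldl (fun m ud =>
      if k ≤ (ud.2.length : Int) then
        ud.2.foldl (fun m2 p => m2.modify p 0 (· + 1)) m
      else m) (PySem.Dict.empty : PySem.Dict String Int)).getD x 0
    = s.foldl (fun acc pd =>
        if pd.1 == x && decide (k ≤ (s.foldl (fun c pd => c.modify pd.2 0 (· + 1))
            (PySem.Dict.empty : PySem.Dict String Int)).getD pd.2 0) then acc + 1 else acc)
        (0 : Int) := by
  obtain ⟨h1, h2, h3⟩ := h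
  rw [PySem.List.foldl_if_add_one
    (fun pd : String × String => pd.1 == x && decide (k ≤ (s.foldl
      (fun c pd => c.modify pd.2 0 (· + 1))
      (PySem.Dict.empty : PySem.Dict String Int)).getD pd.2 0)) s 0,
    ← PySem.List.sum_map_ite_one_zero
    (fun pd : String × String => pd.1 == x && decide (k ≤ (s.foldl
      (fun c pd => c.modify pd.2 0 (· + 1))
      (PySem.Dict.empty : PySem.Dict String Int)).getD pd.2 0)) s]
  rw [pv_mailed_getD k x rep.items (PySem.Dict.empty : PySem.Dict String Int),
    PySem.Dict.getD_empty,
    PySem.Dict.items_eq_map_keys rep h1 PySem.Set.empty, List.map_map]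
  rw [pv_sum_partition _ rep.keys s h1 h3]
  simp only [zero_add]
  refine congrArg List.sum (List.map_congr_left ?_)
  intro d _
  exact (pv_per_key k x s _ (fun d' => pv_cnt_getD s d') (rep.getD d PySem.Set.empty) d (h2 d)).symm

-- ===== VERDICT (by name: the statement is the Claim_ definition above) =====
theorem solution_spec : Claim_equal_solution := by
  intro id_list report k _ _
  unfold Spec_solution
  simp only [solution, solution_alt]
  rw [pv_foldA report PySem.Dict.empty, pv_foldB report PySem.Set.empty]
  have hrel := pv_rel_fold (pvLogPairs report) PySem.Dict.empty [] pv_rel_init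
  apply List.map_congr_left
  intro x _
  exact pv_value_eq k x _ _ hrel
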